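-- pv_equiv track=rewrite | github.com/golfyangkee/daily_quiz | 프로그래머스/0/181904. 세로 읽기/세로 읽기.py | solution
-- ===== SOURCE A (Python) =====
-- def solution(my_string, m, c):
--     # 내가 푼 것
--     answer = ''
--     result = []
--     for i in range(len(my_string)//m): # 짜른 문자 result 리스트에 저장
--         result.append(my_string[m*i:m*i+m])
--
--     for r in result: # 리스트 원소들 하나씩 빼서 c번째 answer에 넣기
--         answer += r[c-1] # 배열로 보면 -1 해줘야 해당 번째니까
--     return answer
-- ===== SOURCE B (Python) =====
-- def solution(my_string, m, c):
--     # One strided slice over the complete rows: column c of the len//m x m grid.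
--     end = len(my_string) // m * m
--     return my_string[c-1:end:m]
-- ===== Notes on version B (the rewrite author's own statement) =====
-- stated objective: simpler
-- what changed: A's two loops (materialize the list of m-sized rows, then append row[c-1] per row) are replaced by a single strided slice my_string[c-1:(len//m)*m:m] that reads only the needed column characters.
-- outside the precondition, e.g. on solution('abcd', 2, 0): A returns 'bd', B returns 'd'
import Mathlib
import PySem

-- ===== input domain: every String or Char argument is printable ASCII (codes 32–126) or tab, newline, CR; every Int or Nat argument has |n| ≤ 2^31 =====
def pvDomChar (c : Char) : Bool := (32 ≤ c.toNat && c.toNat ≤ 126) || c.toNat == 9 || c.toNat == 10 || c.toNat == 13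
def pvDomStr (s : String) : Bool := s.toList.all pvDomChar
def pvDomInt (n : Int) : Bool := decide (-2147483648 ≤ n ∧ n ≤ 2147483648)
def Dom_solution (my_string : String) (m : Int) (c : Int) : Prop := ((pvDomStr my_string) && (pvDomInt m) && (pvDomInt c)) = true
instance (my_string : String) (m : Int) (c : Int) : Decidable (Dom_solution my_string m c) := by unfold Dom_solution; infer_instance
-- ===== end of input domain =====

-- B replaces A's two loops (build the list of m-sized rows, then append row[c-1] per row)
-- by one strided slice my_string[c-1 : (len//m)*m : m]; objective: simpler.

-- ===== PORT A =====
def solution (my_string : String) (m : Int) (c : Int) : String :=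
  let cs := my_string.toList
  -- for i in range(len(my_string)//m): result.append(my_string[m*i:m*i+m])
  let result : List (List Char) :=
    (PySem.List.pyRange 0 (PySem.Int.floordiv (cs.length : Int) m) 1).foldl
      (fun acc i => acc ++ [PySem.List.slice cs (some (m * i)) (some (m * i + m))]) []
  -- for r in result: answer += r[c-1]   (r[c-1] raises IndexError outside Pre_; default never read inside Pre_)
  let answer : List Char :=
    result.foldl (fun acc r => acc ++ [PySem.List.pyGetD r (c - 1) ' ']) []
  String.ofList answer

-- ===== PORT B =====
def solution_alt (my_string : String) (m : Int) (c : Int) : String :=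
  let endIdx := PySem.Int.floordiv (PySem.Str.len my_string) m * m
  (PySem.Str.slice? my_string (some (c - 1)) (some endIdx) m).getD ""

-- ===== PRECONDITION & SPEC =====
-- Pre_ excludes m = 0 (A raises ZeroDivisionError), c > m with 1 ≤ m ≤ len (A raises IndexError), and
-- c ≤ 0 with 1 ≤ m ≤ len, where A's per-row negative-index wraparound is an accident of its
-- implementation and neither program's value is specified.
def Pre_solution (my_string : String) (m : Int) (c : Int) : Prop :=
  m ≠ 0 ∧ (m < 0 ∨ PySem.Str.len my_string < m ∨ (1 ≤ c ∧ c ≤ m))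
instance (my_string : String) (m : Int) (c : Int) : Decidable (Pre_solution my_string m c) := by
  unfold Pre_solution; infer_instance

def pvWitness_solution : String × Int × Int := ("abcdef", 2, 1)

def Spec_solution (my_string : String) (m : Int) (c : Int) (out : String) : Prop := out = solution_alt my_string m c
instance (my_string : String) (m : Int) (c : Int) (out : String) : Decidable (Spec_solution my_string m c out) := by unfold Spec_solution; infer_instance

-- ===== CLAIM (what is proved, stated in full; the proofs are below) =====
def Claim_equal_solution : Prop := ∀ (my_string : String) (m : Int) (c : Int), Dom_solution my_string m c → Pre_solution my_string m c → Spec_solution my_string m c (solution my_string m c)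

-- ===== LEMMAS AND PROOFS =====

-- A's two appending loops, as a map over the row indices.
theorem solution_chars (my_string : String) (m c : Int) :
    solution my_string m c = String.ofList
      ((PySem.List.pyRange 0 (PySem.Int.floordiv (my_string.toList.length : Int) m) 1).map
        (fun i => PySem.List.pyGetD
          (PySem.List.slice my_string.toList (some (m * i)) (some (m * i + m))) (c - 1) ' ')) := by
  unfold solution
  dsimp only
  rw [PySem.List.foldl_append_singleton_eq_map, PySem.List.foldl_append_singleton_eq_map,
    List.nil_append, List.nil_append, List.map_map]
  rfl

-- m < 0: A builds no rows (range of a nonpositive row count) and B's slice stops before the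
-- string's end index, so both are empty.
theorem stride_neg (cs : List Char) (m c : Int) (hm : m < 0) :
    PySem.Chars.slice? cs (some (c-1)) (some (PySem.Int.floordiv (cs.length:Int) m * m)) m
    = some ((PySem.List.pyRange 0 (PySem.Int.floordiv (cs.length:Int) m) 1).map
        (fun i => PySem.List.pyGetD (PySem.List.slice cs (some (m*i)) (some (m*i+m))) (c-1) ' ')) := by
  set n := PySem.Int.floordiv (cs.length:Int) m with hn
  have hq := PySem.Int.floordiv_mul_add_mod (cs.length:Int) m
  have hr := PySem.Int.mod_neg_bounds (cs.length:Int) hm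
  rw [← hn] at hq
  have hE : (cs.length:Int) ≤ n * m := by omega
  have hn0 : n ≤ 0 := by
    by_contra h
    have : n * m < 0 := mul_neg_of_pos_of_neg (by omega) hm
    omega
  simp only [PySem.Chars.slice?, PySem.List.slice?, PySem.List.sliceIndices, PySem.List.pyRange]
  rw [if_neg (by omega : ¬ m = 0), if_neg (by omega : ¬ (1:Int) = 0)]
  simp only [if_pos hm, if_neg (by omega : ¬ (0:Int) < m), if_pos (by norm_num : (0:Int) < 1),
    if_neg (by omega : ¬ (0:Int) < n)]
  rw [if_neg (show ¬ (if n * m < 0 then max (n * m + (cs.length:Int)) (-1)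
        else min (n * m) ((cs.length:Int) - 1)) <
      (if c - 1 < 0 then max (c - 1 + (cs.length:Int)) (-1)
        else min (c - 1) ((cs.length:Int) - 1)) by
    split_ifs <;> omega)]
  simp

-- 0 < m with the string shorter than one row: no rows, and B's slice stops at index 0.
theorem stride_small (cs : List Char) (m c : Int) (hm : 1 ≤ m) (hlen : (cs.length:Int) < m) :
    PySem.Chars.slice? cs (some (c-1)) (some (PySem.Int.floordiv (cs.length:Int) m * m)) m
    = some ((PySem.List.pyRange 0 (PySem.Int.floordiv (cs.length:Int) m) 1).map
        (fun i => PySem.List.pyGetD (PySem.List.slice cs (some (m*i)) (some (m*i+m))) (c-1) ' ')) := by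
  have hn : PySem.Int.floordiv (cs.length:Int) m = 0 :=
    (PySem.Int.floordiv_eq_iff_of_pos (by omega)).2 (by constructor <;> omega)
  rw [hn]
  simp only [PySem.Chars.slice?, PySem.List.slice?, PySem.List.sliceIndices, PySem.List.pyRange]
  rw [if_neg (by omega : ¬ m = 0), if_neg (by omega : ¬ (1:Int) = 0)]
  simp only [zero_mul, if_neg (by omega : ¬ m < 0), if_pos (by omega : (0:Int) < m),
    if_pos (by norm_num : (0:Int) < 1), if_neg (lt_irrefl (0:Int))]
  rw [if_neg (show ¬ (if c - 1 < 0 then max (c - 1 + (cs.length:Int)) 0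
        else min (c - 1) (cs.length:Int)) < min 0 (cs.length:Int) by
    split_ifs <;> omega)]
  simp

-- The main case 0 < m, 1 ≤ c ≤ m: B's strided slice picks exactly A's row characters
-- cs[m*i + (c-1)] for i < len // m.
theorem stride_main (cs : List Char) (m c : Int) (hm : 1 ≤ m) (hc1 : 1 ≤ c) (hcm : c ≤ m) :
    PySem.Chars.slice? cs (some (c-1)) (some (PySem.Int.floordiv (cs.length:Int) m * m)) m
    = some ((PySem.List.pyRange 0 (PySem.Int.floordiv (cs.length:Int) m) 1).map
        (fun i => PySem.List.pyGetD (PySem.List.slice cs (some (m*i)) (some (m*i+m))) (c-1) ' ')) := by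
  set n := PySem.Int.floordiv (cs.length:Int) m with hn
  have hnm : n * m ≤ (cs.length:Int) ∧ (cs.length:Int) < (n+1)*m :=
    (PySem.Int.floordiv_eq_iff_of_pos (by omega)).1 hn.symm
  have hn0 : 0 ≤ n := by
    rw [hn, PySem.Int.floordiv_eq_ediv_of_pos (by omega)]
    exact Int.ediv_nonneg (by positivity) (by omega)
  have hnm0 : 0 ≤ n * m := mul_nonneg hn0 (by omega)
  simp only [PySem.Chars.slice?, PySem.List.slice?, PySem.List.sliceIndices, PySem.List.pyRange]
  rw [if_neg (by omega : ¬ m = 0), if_neg (by omega : ¬ (1:Int) = 0)]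
  simp only [if_neg (by omega : ¬ m < 0), if_neg (by omega : ¬ c - 1 < 0),
    if_neg (by omega : ¬ n * m < 0), if_pos (by omega : (0:Int) < m),
    if_pos (by norm_num : (0:Int) < 1), min_eq_left hnm.1]
  rcases eq_or_lt_of_le hn0 with h0 | hpos
  · -- n = 0 : both sides are empty
    rw [← h0]
    simp only [zero_mul]
    rw [if_neg (by omega : ¬ min (c - 1) (cs.length:Int) < 0), if_neg (lt_irrefl (0:Int))]
    simp
  · -- n ≥ 1
    have hmn : m ≤ n * m := by nlinarith
    have hs : min (c-1) (cs.length:Int) = c - 1 := min_eq_left (by omega)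
    rw [hs, if_pos (by omega : c - 1 < n * m), if_pos hpos]
    have hcount : ((n * m - (c-1) + m - 1) / m).toNat = n.toNat := by
      have h1 : n * m - (c-1) + m - 1 = (m - c) + n * m := by ring
      rw [h1, Int.add_mul_ediv_right _ _ (by omega : m ≠ 0),
        Int.ediv_eq_zero_of_lt (by omega) (by omega)]
      simp
    have hcount2 : ((n - 0 + 1 - 1) / 1).toNat = n.toNat := by simp
    rw [hcount, hcount2, List.map_map]
    congr 1
    have key : ∀ k ∈ List.range n.toNat,
        cs[(c - 1 + m * (k:Int)).toNat]?
        = some (PySem.List.pyGetD (PySem.List.slice cs (some (m * (0 + 1 * (k:Int)))) (some (m * (0 + 1 * (k:Int)) + m))) (c-1) ' ') := by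
      intro k hk
      have hkn : (k:Int) ≤ n - 1 := by
        have := List.mem_range.1 hk; omega
      have ha0 : 0 ≤ m * (k:Int) := mul_nonneg (by omega) (by positivity)
      have ham : m * (k:Int) + m ≤ (cs.length:Int) := by
        have h1 : m * ((k:Int)+1) ≤ m * n := mul_le_mul_of_nonneg_left (by omega) (by omega)
        nlinarith
      simp only [zero_add, one_mul]
      set a := m * (k:Int) with hA
      rw [PySem.List.slice_toNat cs ha0 (by omega),
        PySem.List.pyGetD_eq_getElem _ _ (by omega) (by
          simp only [List.length_take, List.length_drop]
          omega)]
      rw [List.getElem_take, List.getElem_drop]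
      rw [List.getElem?_eq_getElem (by omega)]
      congr 1
      exact getElem_congr rfl (by omega) _
    rw [List.filterMap_congr key]
    simp

-- ===== VERDICT (by name: the statement is the Claim_ definition above) =====
theorem solution_spec : Claim_equal_solution := by
  intro s m c _ hpre
  obtain ⟨hm0, hcase⟩ := hpre
  rw [PySem.Str.len_eq] at hcase
  unfold Spec_solution solution_alt
  rw [solution_chars]
  dsimp only
  rw [PySem.Str.len_eq]
  have hEq : PySem.Chars.slice? s.toList (some (c-1))
      (some (PySem.Int.floordiv (s.toList.length:Int) m * m)) m
      = some ((PySem.List.pyRange 0 (PySem.Int.floordiv (s.toList.length:Int) m) 1).map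
          (fun i => PySem.List.pyGetD (PySem.List.slice s.toList (some (m*i)) (some (m*i+m))) (c-1) ' ')) := by
    rcases hcase with hm | hlen | ⟨hc1, hcm⟩
    · exact stride_neg s.toList m c hm
    · exact stride_small s.toList m c (by omega) hlen
    · exact stride_main s.toList m c (by omega) hc1 hcm
  rw [PySem.Str.slice?, hEq]
  rfl
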